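-- pv_equiv track=rewrite | github.com/janlachowski/nonogram-solver | WalkSAT.py | line_error
-- ===== SOURCE A (Python) =====
-- def get_blocks(line):
--     # return list of lengths of contiguous blocks of 1's in a list
--     blocks = []
--     count = 0
--     for bit in line:
--         if bit == 1:
--             count += 1
--         elif count > 0:
--             blocks.append(count)
--             count = 0
--     if count > 0:
--         blocks.append(count)
--     return blocks
--
-- def line_error(line, clues):
--     """
--     Compute an error value for a given row (or column) based on its current binary list `line`
--     and the expected clue (a list of integers). The error is 0 when the contiguous blocks
--     of 1's exactly match the clues.
--
--     Heuristic:
--       - For each corresponding block, add |block_length - clue|.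
--       - For extra blocks (more blocks than clues), add the sum of extra block lengths.
--       - For missing blocks (fewer blocks than clues), add the sum of missing clue values.
--     """
--     blocks = get_blocks(line)
--     error = 0
--     # compare the common part (minimum number of blocks/clues)
--     min_len = min(len(blocks), len(clues))
--     for i in range(min_len):
--         error += abs(blocks[i] - clues[i])
--     # penalty for extra blocks
--     if len(blocks) > len(clues):
--         error += sum(blocks[len(clues):])
--     # penalty for missing blocks
--     elif len(blocks) < len(clues):
--         error += sum(clues[len(blocks):])
--     return error
-- ===== SOURCE B (Python) =====
-- def line_error(line, clues):
--     # single streaming pass: detect blocks and compare with clues on the fly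
--     error = 0
--     count = 0
--     ci = 0
--     for bit in line:
--         if bit == 1:
--             count += 1
--         elif count > 0:
--             error += abs(count - clues[ci]) if ci < len(clues) else count
--             ci += 1
--             count = 0
--     if count > 0:
--         error += abs(count - clues[ci]) if ci < len(clues) else count
--         ci += 1
--     return error + sum(clues[ci:])
-- ===== Notes on version B (the rewrite author's own statement) =====
-- stated objective: alternative
-- what changed: replaces the two-phase build-a-blocks-list-then-index-compare with a single streaming pass over the line that maintains a running block count, a clue index and the error, never materialising the blocks list
import Mathlib
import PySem

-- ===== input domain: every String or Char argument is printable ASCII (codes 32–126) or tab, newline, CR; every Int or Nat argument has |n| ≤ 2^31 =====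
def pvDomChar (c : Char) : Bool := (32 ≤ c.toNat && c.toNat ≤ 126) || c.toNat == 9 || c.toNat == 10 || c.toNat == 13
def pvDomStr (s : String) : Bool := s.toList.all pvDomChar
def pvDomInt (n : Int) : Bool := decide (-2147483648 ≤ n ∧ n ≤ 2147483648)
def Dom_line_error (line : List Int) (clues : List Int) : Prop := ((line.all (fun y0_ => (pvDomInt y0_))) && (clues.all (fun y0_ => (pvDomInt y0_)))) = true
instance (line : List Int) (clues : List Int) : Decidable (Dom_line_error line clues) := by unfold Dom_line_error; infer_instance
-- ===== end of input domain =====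

-- B replaces A's build-blocks-then-compare with one streaming pass over the line (alternative decomposition, same cost).

-- ===== PORT A =====
def get_blocks (line : List Int) : List Int :=
  let st := line.foldl (fun (st : List Int × Int) bit =>
    if bit == 1 then (st.1, st.2 + 1)
    else if st.2 > 0 then (st.1 ++ [st.2], 0)
    else st) ([], 0)
  if st.2 > 0 then st.1 ++ [st.2] else st.1

def line_error (line : List Int) (clues : List Int) : Int :=
  let blocks := get_blocks line
  let error : Int := 0
  let min_len : Nat := min blocks.length clues.length
  -- for i in range(min_len): indices are 0 ≤ i < min_len, in range for both lists, so getD is Python's blocks[i]/clues[i]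
  let error := (List.range min_len).foldl
      (fun error i => error + |blocks.getD i 0 - clues.getD i 0|) error
  if blocks.length > clues.length then error + (blocks.drop clues.length).sum
  else if blocks.length < clues.length then error + (clues.drop blocks.length).sum
  else error

-- ===== PORT B =====
-- streaming loop of Source B; ci is the clue index (a non-negative Python int, so Nat; clues[ci] guarded by ci < len(clues))
def altLoop (clues : List Int) : List Int → Int → Int → Nat → Int
  | [], error, count, ci =>
      if count > 0 then
        (if ci < clues.length then error + |count - clues.getD ci 0| else error + count)
          + (clues.drop (ci + 1)).sum
      else error + (clues.drop ci).sum
  | bit :: rest, error, count, ci =>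
      if bit == 1 then altLoop clues rest error (count + 1) ci
      else if count > 0 then
        altLoop clues rest
          (if ci < clues.length then error + |count - clues.getD ci 0| else error + count) 0 (ci + 1)
      else altLoop clues rest error count ci

def line_error_alt (line : List Int) (clues : List Int) : Int :=
  altLoop clues line 0 0 0

-- ===== PRECONDITION & SPEC =====
def Spec_line_error (line : List Int) (clues : List Int) (out : Int) : Prop := out = line_error_alt line clues
instance (line : List Int) (clues : List Int) (out : Int) : Decidable (Spec_line_error line clues out) := by unfold Spec_line_error; infer_instance

-- ===== CLAIM (what is proved, stated in full; the proofs are below) =====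
def Claim_equal_line_error : Prop := ∀ (line : List Int) (clues : List Int), Dom_line_error line clues → Spec_line_error line clues (line_error line clues)

-- ===== LEMMAS AND PROOFS =====

-- the blocks of `line` when a block of length `count` is currently open
def blocksFrom : List Int → Int → List Int
  | [], count => if count > 0 then [count] else []
  | bit :: rest, count =>
      if bit == 1 then blocksFrom rest (count + 1)
      else if count > 0 then count :: blocksFrom rest 0
      else blocksFrom rest count

-- reference error value: |b-c| on the zipped part, plus the sum of whichever tail is longer
def cmpE : List Int → List Int → Int
  | [], cs => cs.sum
  | b :: bs, [] => b + cmpE bs []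
  | b :: bs, c :: cs => |b - c| + cmpE bs cs

lemma get_blocks_loop (line : List Int) : ∀ (blocks : List Int) (count : Int),
    (let st := line.foldl (fun (st : List Int × Int) bit =>
        if bit == 1 then (st.1, st.2 + 1)
        else if st.2 > 0 then (st.1 ++ [st.2], 0)
        else st) (blocks, count)
     if st.2 > 0 then st.1 ++ [st.2] else st.1) = blocks ++ blocksFrom line count := by
  induction line with
  | nil =>
      intro blocks count
      simp only [List.foldl_nil, blocksFrom]
      split <;> simp_all
  | cons bit rest ih =>
      intro blocks count
      simp only [List.foldl_cons, blocksFrom]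
      by_cases h1 : bit == 1
      · simpa [h1] using ih blocks (count + 1)
      · by_cases h2 : count > 0
        · simpa [h1, h2] using ih (blocks ++ [count]) 0
        · simpa [h1, h2] using ih blocks count

lemma get_blocks_eq (line : List Int) : get_blocks line = blocksFrom line 0 := by
  simpa [get_blocks] using get_blocks_loop line [] 0

lemma cmpE_nil_right (bs : List Int) : cmpE bs [] = bs.sum := by
  induction bs with
  | nil => simp [cmpE]
  | cons b bs ih => simp [cmpE, ih]

lemma foldl_add_init (f : Nat → Int) (l : List Nat) :
    ∀ init : Int, l.foldl (fun e i => e + f i) init = init + l.foldl (fun e i => e + f i) 0 := by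
  induction l with
  | nil => simp
  | cons x xs ih =>
      intro init
      simp only [List.foldl_cons]
      rw [ih (init + f x), ih (0 + f x)]
      ring

lemma cmpE_eq_A (bs : List Int) : ∀ cs : List Int,
    ((List.range (min bs.length cs.length)).foldl
        (fun e i => e + |bs.getD i 0 - cs.getD i 0|) 0)
      + (if bs.length > cs.length then (bs.drop cs.length).sum
         else if bs.length < cs.length then (cs.drop bs.length).sum else 0)
      = cmpE bs cs := by
  induction bs with
  | nil =>
      intro cs
      cases cs <;> simp [cmpE]
  | cons b bs ih =>
      intro cs
      cases cs with
      | nil => simp [cmpE_nil_right]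
      | cons c cs =>
          have hmin : min (b :: bs).length (c :: cs).length = min bs.length cs.length + 1 := by
            simp [Nat.succ_min_succ]
          rw [hmin, List.range_succ_eq_map]
          simp only [List.foldl_cons, List.foldl_map, List.getD_cons_zero, List.getD_cons_succ]
          rw [foldl_add_init (fun i => |bs.getD i 0 - cs.getD i 0|) _ (0 + |b - c|)]
          have hih := ih cs
          simp only [List.length_cons, List.drop_succ_cons, gt_iff_lt,
            Nat.add_lt_add_iff_right] at *
          simp only [cmpE]
          rw [← hih]
          ring

lemma line_error_eq_cmpE (line clues : List Int) :
    line_error line clues = cmpE (get_blocks line) clues := by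
  rw [← cmpE_eq_A (get_blocks line) clues]
  simp only [line_error]
  split_ifs <;> ring

lemma drop_eq_getD_cons (cs : List Int) (i : Nat) (h : i < cs.length) :
    cs.drop i = cs.getD i 0 :: cs.drop (i + 1) := by
  rw [List.getD_eq_getElem cs 0 h]
  exact List.drop_eq_getElem_cons h

lemma altLoop_eq_cmpE (clues : List Int) (line : List Int) :
    ∀ (error count : Int) (ci : Nat),
      altLoop clues line error count ci
        = error + cmpE (blocksFrom line count) (clues.drop ci) := by
  induction line with
  | nil =>
      intro error count ci
      simp only [altLoop, blocksFrom]
      by_cases hc : count > 0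
      · by_cases hci : ci < clues.length
        · rw [drop_eq_getD_cons clues ci hci]
          simp only [if_pos hc, if_pos hci, cmpE]
          simp
          ring
        · have h0 : clues.drop ci = [] := List.drop_eq_nil_of_le (by omega)
          have h1 : clues.drop (ci + 1) = [] := List.drop_eq_nil_of_le (by omega)
          simp only [if_pos hc, if_neg hci, h0, h1, cmpE]
          simp
      · simp [hc, cmpE]
  | cons bit rest ih =>
      intro error count ci
      simp only [altLoop, blocksFrom]
      by_cases h1 : bit == 1
      · simp [h1, ih]
      · by_cases hc : count > 0
        · rw [if_neg h1, if_pos hc, if_neg h1, if_pos hc]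
          by_cases hci : ci < clues.length
          · rw [if_pos hci, ih, drop_eq_getD_cons clues ci hci]
            simp only [cmpE]
            ring
          · have h0 : clues.drop ci = [] := List.drop_eq_nil_of_le (by omega)
            have h2 : clues.drop (ci + 1) = [] := List.drop_eq_nil_of_le (by omega)
            rw [if_neg hci, ih, h0, h2]
            simp only [cmpE_nil_right, List.sum_cons]
            ring
        · simp [h1, hc, ih]

-- ===== VERDICT (by name: the statement is the Claim_ definition above) =====
theorem line_error_spec : Claim_equal_line_error := by
  intro line clues _
  unfold Spec_line_error line_error_alt
  rw [altLoop_eq_cmpE, line_error_eq_cmpE, get_blocks_eq]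
  simp
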